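-- pv_equiv track=rewrite | github.com/IIIM-IS/ICE-ID-2.0 | bench/bench/blocking/phonetic_blocking.py | _soundex
-- ===== SOURCE A (Python) =====
-- def _soundex(s: str) -> str:
--     """Compute Soundex code."""
--     if not s:
--         return ""
--
--     s = "".join(c for c in s.upper() if c.isalpha())
--     if not s:
--         return ""
--
--     result = s[0]
--
--     mapping = {
--         'B': '1', 'F': '1', 'P': '1', 'V': '1',
--         'C': '2', 'G': '2', 'J': '2', 'K': '2', 'Q': '2', 'S': '2', 'X': '2', 'Z': '2',
--         'D': '3', 'T': '3',
--         'L': '4',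
--         'M': '5', 'N': '5',
--         'R': '6'
--     }
--
--     prev_code = mapping.get(s[0], '0')
--
--     for char in s[1:]:
--         code = mapping.get(char, '0')
--         if code != '0' and code != prev_code:
--             result += code
--             prev_code = code
--         if len(result) >= 4:
--             break
--
--     return result.ljust(4, '0')
-- ===== SOURCE B (Python) =====
-- def _soundex(s: str) -> str:
--     letters = [c for c in s.upper() if c.isalpha()]
--     if not letters:
--         return ""
--     mapping = {
--         'B': '1', 'F': '1', 'P': '1', 'V': '1',
--         'C': '2', 'G': '2', 'J': '2', 'K': '2', 'Q': '2', 'S': '2', 'X': '2', 'Z': '2',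
--         'D': '3', 'T': '3',
--         'L': '4',
--         'M': '5', 'N': '5',
--         'R': '6'
--     }
--     codes = [mapping.get(c, '0') for c in letters]
--     seq = [codes[0]] + [c for c in codes[1:] if c != '0']
--     digits = [c for p, c in zip(seq, seq[1:]) if c != p]
--     return (letters[0] + ''.join(digits[:3])).ljust(4, '0')
-- ===== Notes on version B (the rewrite author's own statement) =====
-- stated objective: idiomatic
-- what changed: Replaced A's single fused loop with prev_code state and an early len>=4 break by separate passes: map letters to digit codes, filter zeros (seeded with the first code), collapse consecutive duplicates via a zip(seq, seq[1:]) comprehension, take 3 digits, pad with ljust.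
import Mathlib
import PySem

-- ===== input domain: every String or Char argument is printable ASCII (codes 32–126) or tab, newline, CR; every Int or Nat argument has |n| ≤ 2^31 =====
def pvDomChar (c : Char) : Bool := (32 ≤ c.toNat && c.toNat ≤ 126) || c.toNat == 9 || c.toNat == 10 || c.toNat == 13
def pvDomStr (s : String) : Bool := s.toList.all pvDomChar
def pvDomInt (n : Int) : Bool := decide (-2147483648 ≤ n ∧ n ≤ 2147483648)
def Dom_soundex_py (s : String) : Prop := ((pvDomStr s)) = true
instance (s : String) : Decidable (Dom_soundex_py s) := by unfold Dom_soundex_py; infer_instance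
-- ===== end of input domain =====

-- B replaces A's fused loop (prev_code state + early break) by map/filter/zip passes; objective: idiomatic.

-- the shared Soundex mapping dict (the literal dict both Pythons write out)
def sdxMapping : PySem.Dict Char Char :=
  PySem.Dict.ofList [('B','1'), ('F','1'), ('P','1'), ('V','1'),
    ('C','2'), ('G','2'), ('J','2'), ('K','2'), ('Q','2'), ('S','2'), ('X','2'), ('Z','2'),
    ('D','3'), ('T','3'), ('L','4'), ('M','5'), ('N','5'), ('R','6')]

-- ===== PORT A =====
-- A's for-loop over s[1:] with result/prev_code state and the len>=4 break
def sdxLoopA : List Char → List Char → Char → List Char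
  | [], result, _ => result
  | ch :: rest, result, prev_code =>
    let code := sdxMapping.getD ch '0'
    if code ≠ '0' ∧ code ≠ prev_code then
      let result' := result ++ [code]
      if result'.length ≥ 4 then result' else sdxLoopA rest result' code
    else
      if result.length ≥ 4 then result else sdxLoopA rest result prev_code

def soundex_py (s : String) : String :=
  if s.toList = [] then "" else
  let s1 := (PySem.Chars.upper s.toList).filter PySem.Chars.isalpha
  match s1 with
  | [] => ""
  | c0 :: rest =>
    let result := [c0]
    let prev_code := sdxMapping.getD c0 '0'
    let r := sdxLoopA rest result prev_code
    String.mk (r ++ List.replicate (4 - r.length) '0')   -- result.ljust(4, '0')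

-- ===== PORT B =====
def soundex_py_alt (s : String) : String :=
  let letters := (PySem.Chars.upper s.toList).filter PySem.Chars.isalpha
  match letters with
  | [] => ""
  | l0 :: ltail =>
    let codes := (l0 :: ltail).map (fun c => sdxMapping.getD c '0')
    let seq := codes.headI :: (codes.tail.filter (fun c => c ≠ '0'))
    let digits := (seq.zip seq.tail).filterMap
      (fun pc => if pc.2 ≠ pc.1 then some pc.2 else none)
    let res := l0 :: digits.take 3
    String.mk (res ++ List.replicate (4 - res.length) '0')   -- .ljust(4, '0')

-- ===== PRECONDITION & SPEC =====
def Spec_soundex_py (s : String) (out : String) : Prop := out = soundex_py_alt s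
instance (s : String) (out : String) : Decidable (Spec_soundex_py s out) := by unfold Spec_soundex_py; infer_instance

-- ===== CLAIM (what is proved, stated in full; the proofs are below) =====
def Claim_equal_soundex_py : Prop := ∀ (s : String), Dom_soundex_py s → Spec_soundex_py s (soundex_py s)

-- ===== LEMMAS AND PROOFS =====

-- dedup of consecutive equal codes, seeded with prev (models B's zip pass on the zero-free list)
def sdxDedup : Char → List Char → List Char
  | _, [] => []
  | prev, c :: rest => if c ≠ prev then c :: sdxDedup c rest else sdxDedup prev rest

-- A's collapse of the raw letter tail (zero codes skipped, prev unchanged on zeros)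
def sdxCol : Char → List Char → List Char
  | _, [] => []
  | prev, ch :: rest =>
    let code := sdxMapping.getD ch '0'
    if code ≠ '0' ∧ code ≠ prev then code :: sdxCol code rest else sdxCol prev rest

theorem sdxLoopA_eq (l : List Char) : ∀ (res : List Char) (prev : Char),
    res.length < 4 →
    sdxLoopA l res prev = res ++ (sdxCol prev l).take (4 - res.length) := by
  induction l with
  | nil => intro res prev _; simp [sdxLoopA, sdxCol]
  | cons ch rest ih =>
    intro res prev h
    simp only [sdxLoopA, sdxCol]
    by_cases hc : sdxMapping.getD ch '0' ≠ '0' ∧ sdxMapping.getD ch '0' ≠ prev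
    · simp only [if_pos hc, List.length_append, List.length_singleton]
      by_cases h4 : res.length + 1 ≥ 4
      · have hl : res.length = 3 := by omega
        simp [h4, hl, List.take_succ_cons]
      · rw [if_neg h4, ih _ _ (by simp; omega)]
        have h5 : 4 - res.length = (4 - (res.length + 1)) + 1 := by omega
        simp [h5, List.take_succ_cons]
    · rw [if_neg hc, if_neg (show ¬ res.length ≥ 4 by omega), ih _ _ h]
      simp [hc]

theorem sdxCol_eq_dedup (l : List Char) : ∀ (prev : Char),
    sdxCol prev l =
      sdxDedup prev ((l.map (fun c => sdxMapping.getD c '0')).filter (fun c => c ≠ '0')) := by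
  induction l with
  | nil => intro prev; simp [sdxCol, sdxDedup]
  | cons ch rest ih =>
    intro prev
    simp only [sdxCol, List.map_cons, List.filter_cons]
    by_cases h0 : sdxMapping.getD ch '0' = '0'
    · have : ¬ (sdxMapping.getD ch '0' ≠ '0' ∧ sdxMapping.getD ch '0' ≠ prev) := by
        simp [h0]
      rw [if_neg this]
      simp [h0, ih]
    · simp only [h0, ne_eq, not_false_iff, decide_true, if_true, sdxDedup]
      by_cases hp : sdxMapping.getD ch '0' = prev
      · have : ¬ (sdxMapping.getD ch '0' ≠ '0' ∧ sdxMapping.getD ch '0' ≠ prev) := by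
          simp [hp]
        simp [this, hp, ih]
      · simp [h0, hp, ih]

theorem zip_filterMap_eq_dedup (xs : List Char) : ∀ (p : Char),
    ((p :: xs).zip xs).filterMap (fun pc => if pc.2 ≠ pc.1 then some pc.2 else none) =
      sdxDedup p xs := by
  induction xs with
  | nil => intro p; simp [sdxDedup]
  | cons c rest ih =>
    intro p
    simp only [List.zip_cons_cons, List.filterMap_cons, sdxDedup, ne_eq, ite_not]
    by_cases h : c = p
    · have hp := ih p; simp only [ne_eq, ite_not] at hp
      simp [h, hp]
    · have hc := ih c; simp only [ne_eq, ite_not] at hc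
      simp [h, hc]

-- ===== VERDICT (by name: the statement is the Claim_ definition above) =====
theorem soundex_py_spec : Claim_equal_soundex_py := by
  intro s _
  unfold Spec_soundex_py soundex_py soundex_py_alt
  by_cases hs : s.toList = []
  · simp [hs, PySem.Chars.upper]
  · rw [if_neg hs]
    cases hfl : (PySem.Chars.upper s.toList).filter PySem.Chars.isalpha with
    | nil => rfl
    | cons c0 rest =>
      simp only [List.map_cons, List.tail_cons, List.headI, List.tail]
      rw [sdxLoopA_eq rest [c0] (sdxMapping.getD c0 '0') (by simp),
          sdxCol_eq_dedup, ← zip_filterMap_eq_dedup]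
      simp
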